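-- pv_equiv track=rewrite | github.com/ShivaniDeshmukh28/DATA-SCIENCE | Leetcode_problems_1.py | count_mountains
-- ===== SOURCE A (Python) =====
-- def count_mountains(path):
--     elevation = 0
--     mountains = 0
--     for i in path:
--         if i == "U":
--             elevation += 1
--         else:
--             elevation -= 1
--             if elevation == 0:
--                 mountains += 1
--     return mountains
-- ===== SOURCE B (Python) =====
-- def count_mountains(path):
--     prefix = [0]
--     for c in path:
--         prefix.append(prefix[-1] + (1 if c == "U" else -1))
--     return sum(1 for prev, cur in zip(prefix, prefix[1:]) if prev > 0 and cur == 0)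
-- ===== Notes on version B (the rewrite author's own statement) =====
-- stated objective: alternative
-- what changed: B first materialises the full running-elevation prefix sequence, then counts adjacent pairs where the elevation drops from positive to zero, instead of A's single fold that mutates elevation and counter together.
import Mathlib
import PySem

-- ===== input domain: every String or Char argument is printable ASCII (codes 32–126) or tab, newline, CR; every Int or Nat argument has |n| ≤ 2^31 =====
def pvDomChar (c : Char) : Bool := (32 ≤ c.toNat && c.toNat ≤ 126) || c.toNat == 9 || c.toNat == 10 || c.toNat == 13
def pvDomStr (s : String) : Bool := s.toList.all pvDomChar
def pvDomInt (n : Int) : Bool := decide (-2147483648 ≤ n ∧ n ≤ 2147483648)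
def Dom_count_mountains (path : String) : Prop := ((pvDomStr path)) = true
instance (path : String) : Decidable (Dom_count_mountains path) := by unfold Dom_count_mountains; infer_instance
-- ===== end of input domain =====

-- B builds the full running-elevation prefix list first and then counts adjacent
-- (positive → zero) drops, a different decomposition of A's single mutating fold.


-- ===== PORT A =====
-- A: one fold over the characters carrying (elevation, mountains).
def count_mountains (path : String) : Int :=
  (path.toList.foldl
    (fun (st : Int × Int) i =>
      if i == 'U' then (st.1 + 1, st.2)
      else
        let e := st.1 - 1
        (e, if e == 0 then st.2 + 1 else st.2))
    (0, 0)).2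

-- ===== PORT B =====
-- B: build the prefix-elevation list, then count pairs (prev, cur) with prev > 0 and cur = 0.
def count_mountains_alt (path : String) : Int :=
  let pre := path.toList.foldl
    (fun (p : List Int) c => p ++ [p.getLast! + (if c == 'U' then (1 : Int) else -1)]) [0]
  (((pre.zip pre.tail).filter (fun pc => decide (pc.1 > 0) && (pc.2 == 0))).length : Int)

-- ===== PRECONDITION & SPEC =====
def Spec_count_mountains (path : String) (out : Int) : Prop := out = count_mountains_alt path
instance (path : String) (out : Int) : Decidable (Spec_count_mountains path out) := by unfold Spec_count_mountains; infer_instance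

-- ===== CLAIM (what is proved, stated in full; the proofs are below) =====
def Claim_equal_count_mountains : Prop := ∀ (path : String), Dom_count_mountains path → Spec_count_mountains path (count_mountains path)

-- ===== LEMMAS AND PROOFS =====

/-- The prefix-elevation sequence starting at `e`, as a recursion. -/
def pvScan (e : Int) : List Char → List Int
  | [] => [e]
  | c :: cs => e :: pvScan (e + (if c == 'U' then 1 else -1)) cs

lemma pvScan_cons_form (e : Int) (cs : List Char) : ∃ t, pvScan e cs = e :: t := by
  cases cs <;> exact ⟨_, rfl⟩

/-- B's foldl-with-append builds exactly `pvScan`. -/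
lemma build_eq_scan (cs : List Char) (p : List Int) (e : Int) :
    cs.foldl (fun (p : List Int) c => p ++ [p.getLast! + (if c == 'U' then (1 : Int) else -1)])
      (p ++ [e]) = p ++ pvScan e cs := by
  induction cs generalizing p e with
  | nil => simp [pvScan]
  | cons c cs ih =>
    simp only [List.foldl_cons, pvScan]
    have hl : (p ++ [e]).getLast! = e := by simp
    rw [hl]
    have := ih (p ++ [e]) (e + (if c == 'U' then (1 : Int) else -1))
    simpa using this

/-- The pair count over a prefix list, as used by B. -/
def pvZ (l : List Int) : Nat :=
  ((l.zip l.tail).filter (fun pc => decide (pc.1 > 0) && (pc.2 == 0))).length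

lemma pvZ_cons (a b : Int) (t : List Int) :
    pvZ (a :: b :: t) = (if a > 0 ∧ b = 0 then 1 else 0) + pvZ (b :: t) := by
  simp only [pvZ, List.tail_cons, List.zip_cons_cons, List.filter_cons]
  by_cases h : a > 0 ∧ b = 0
  · simp [h.1, h.2, Nat.add_comm]
  · rcases not_and_or.mp h with h1 | h2
    · simp [h1]
    · simp [h2]

lemma pvZ_scan_U (e : Int) (cs : List Char) :
    pvZ (pvScan e ('U' :: cs)) = pvZ (pvScan (e + 1) cs) := by
  obtain ⟨t, ht⟩ := pvScan_cons_form (e + 1) cs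
  have h1 : pvScan e ('U' :: cs) = e :: pvScan (e + 1) cs := by simp [pvScan]
  rw [h1, ht, pvZ_cons, ← ht]
  have hcond : ¬ (e > 0 ∧ e + 1 = 0) := by omega
  simp [hcond]

lemma pvZ_scan_D (e : Int) (c : Char) (cs : List Char) (hc : ¬ c = 'U') :
    pvZ (pvScan e (c :: cs)) = (if e - 1 = 0 then 1 else 0) + pvZ (pvScan (e - 1) cs) := by
  obtain ⟨t, ht⟩ := pvScan_cons_form (e - 1) cs
  have h1 : pvScan e (c :: cs) = e :: pvScan (e - 1) cs := by
    simp [pvScan, hc, sub_eq_add_neg]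
  rw [h1, ht, pvZ_cons, ← ht]
  by_cases h0 : e - 1 = 0
  · have hcond : e > 0 ∧ e - 1 = 0 := by omega
    simp [hcond]
  · have hcond : ¬ (e > 0 ∧ e - 1 = 0) := by omega
    simp [h0]

/-- A's fold equals the count of positive→zero drops in the scan from `e`. -/
lemma fold_eq_count (cs : List Char) (e m : Int) :
    (cs.foldl
      (fun (st : Int × Int) i =>
        if i == 'U' then (st.1 + 1, st.2)
        else
          let e := st.1 - 1
          (e, if e == 0 then st.2 + 1 else st.2)) (e, m)).2
      = m + (pvZ (pvScan e cs) : Int) := by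
  induction cs generalizing e m with
  | nil => simp [pvScan, pvZ]
  | cons c cs ih =>
    by_cases hc : c = 'U'
    · subst hc
      simp only [List.foldl_cons, beq_self_eq_true, if_true]
      rw [ih, pvZ_scan_U]
    · have hcb : (c == 'U') = false := by simp [hc]
      simp only [List.foldl_cons, hcb, Bool.false_eq_true, if_false]
      rw [ih, pvZ_scan_D e c cs hc]
      by_cases h0 : e - 1 = 0
      · simp only [h0, beq_self_eq_true, if_true]
        push_cast
        omega
      · have hb0 : (e - 1 == 0) = false := by simpa using h0
        simp only [hb0, Bool.false_eq_true, if_false, if_neg h0]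
        push_cast
        omega

-- ===== VERDICT (by name: the statement is the Claim_ definition above) =====
theorem count_mountains_spec : Claim_equal_count_mountains := by
  intro path _
  unfold Spec_count_mountains count_mountains count_mountains_alt
  have hb := build_eq_scan path.toList ([] : List Int) 0
  simp only [List.nil_append] at hb
  rw [hb]
  rw [fold_eq_count path.toList 0 0]
  simp [pvZ]
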